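-- pv_equiv track=rewrite | github.com/bradellison/pokemon-simulator | movementFunctions.py | checkWall
-- ===== SOURCE A (Python) =====
-- def checkWall(x,y,location):
--     walls = ['@', '~', 'K', '[', ']', 'D', 'R', 'b', 'S']
--     yAxis = 0
--     for line in location:
--         xAxis = 0
--         for sprite in line:
--             if [xAxis, yAxis] == [x,y]:
--                 if sprite in walls:
--                     return False
--                 else:
--                     return True
--             xAxis += 1
--         yAxis += 1
-- ===== SOURCE B (Python) =====
-- def checkWall(x, y, location):
--     if 0 <= y < len(location):
--         row = location[y]
--         if 0 <= x < len(row):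
--             return row[x] not in '@~K[]DRbS'
--     return None
-- ===== Notes on version B (the rewrite author's own statement) =====
-- stated objective: faster
-- what changed: Replaces the nested row/column scan that counts up to the target coordinates with a bounds check and direct indexing location[y][x].
import Mathlib
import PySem

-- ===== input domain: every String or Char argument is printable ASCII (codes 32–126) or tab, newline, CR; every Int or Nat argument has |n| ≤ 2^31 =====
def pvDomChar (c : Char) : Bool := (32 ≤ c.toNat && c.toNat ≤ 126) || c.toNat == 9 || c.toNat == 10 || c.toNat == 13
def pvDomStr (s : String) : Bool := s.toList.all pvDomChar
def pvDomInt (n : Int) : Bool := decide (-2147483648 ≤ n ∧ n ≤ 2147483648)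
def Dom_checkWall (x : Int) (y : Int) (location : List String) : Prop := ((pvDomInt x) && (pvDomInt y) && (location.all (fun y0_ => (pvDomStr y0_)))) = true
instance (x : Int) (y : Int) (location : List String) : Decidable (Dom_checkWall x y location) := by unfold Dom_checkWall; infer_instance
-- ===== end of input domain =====

-- B replaces A's nested row/column counting scan by a bounds check plus direct indexing location[y][x] (faster, O(1) vs O(width*height)).

-- ===== PORT A =====
def pvWalls : List Char := ['@', '~', 'K', '[', ']', 'D', 'R', 'b', 'S']

-- the inner 'for sprite in line' loop; 'some r' = the function returned r, 'none' = the loop finished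
def checkWallInner (x y yAxis xAxis : Int) (cs : List Char) : Option (Option Bool) :=
  match cs with
  | [] => none
  | sprite :: rest =>
    if xAxis = x ∧ yAxis = y then
      if pvWalls.contains sprite then some (some false) else some (some true)
    else checkWallInner x y yAxis (xAxis + 1) rest

-- the outer 'for line in location' loop; falling off the end returns Python None
def checkWallRows (x y yAxis : Int) (rows : List String) : Option Bool :=
  match rows with
  | [] => none
  | line :: rest =>
    match checkWallInner x y yAxis 0 line.toList with
    | some r => r
    | none => checkWallRows x y (yAxis + 1) rest

def checkWall (x : Int) (y : Int) (location : List String) : Option Bool :=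
  checkWallRows x y 0 location

-- ===== PORT B =====
def checkWall_alt (x : Int) (y : Int) (location : List String) : Option Bool :=
  if 0 ≤ y ∧ y < (location.length : Int) then
    let row := (location.getD y.toNat "").toList
    if 0 ≤ x ∧ x < (row.length : Int) then
      some (!(("@~K[]DRbS".toList).contains (row.getD x.toNat ' ')))
    else none
  else none

-- ===== PRECONDITION & SPEC =====
def Spec_checkWall (x : Int) (y : Int) (location : List String) (out : Option Bool) : Prop := out = checkWall_alt x y location
instance (x : Int) (y : Int) (location : List String) (out : Option Bool) : Decidable (Spec_checkWall x y location out) := by unfold Spec_checkWall; infer_instance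

-- ===== CLAIM (what is proved, stated in full; the proofs are below) =====
def Claim_equal_checkWall : Prop := ∀ (x : Int) (y : Int) (location : List String), Dom_checkWall x y location → Spec_checkWall x y location (checkWall x y location)

-- ===== LEMMAS AND PROOFS =====

def pvWallVal (c : Char) : Option Bool := some (if pvWalls.contains c then false else true)

lemma inner_eq (x y yA : Int) (cs : List Char) (xA : Int) :
    checkWallInner x y yA xA cs =
      if yA = y ∧ xA ≤ x then (cs[(x - xA).toNat]?).map pvWallVal else none := by
  induction cs generalizing xA with
  | nil => simp [checkWallInner]
  | cons c rest ih =>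
    simp only [checkWallInner]
    by_cases hxy : xA = x ∧ yA = y
    · obtain ⟨hx, hy⟩ := hxy
      have h0 : (x - xA).toNat = 0 := by omega
      by_cases hc : c ∈ pvWalls <;> simp [hx, hy, pvWallVal, hc]
    · rw [if_neg hxy, ih]
      by_cases hy : yA = y
      · by_cases hle : xA ≤ x
        · have hne : xA ≠ x := fun h => hxy ⟨h, hy⟩
          have h1 : xA + 1 ≤ x := by omega
          have h2 : (x - xA).toNat = (x - (xA + 1)).toNat + 1 := by omega
          simp [hy, hle, h1, h2]
        · have h1 : ¬ (xA + 1 ≤ x) := by omega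
          simp [hle, h1]
      · simp [hy]

def rowRes (x : Int) (row : String) : Option Bool :=
  if 0 ≤ x then (row.toList[x.toNat]?).map fun c => if pvWalls.contains c then false else true
  else none

lemma rows_eq (x y : Int) (rows : List String) (yA : Int) :
    checkWallRows x y yA rows =
      if yA ≤ y then (rows[(y - yA).toNat]?).bind (rowRes x) else none := by
  induction rows generalizing yA with
  | nil => simp [checkWallRows]
  | cons line rest ih =>
    simp only [checkWallRows]
    rw [inner_eq]
    by_cases hy : yA = y
    · have h0 : (y - yA).toNat = 0 := by omega
      subst hy
      by_cases hx : 0 ≤ x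
      · cases hget : line.toList[x.toNat]? with
        | none =>
          rw [ih]
          simp [hx, hget, rowRes]
        | some c =>
          simp [hx, hget, rowRes, pvWallVal]
      · rw [ih]
        simp [hx, rowRes]
    · rw [if_neg (fun h => hy h.1), ih]
      by_cases hle : yA ≤ y
      · have h1 : yA + 1 ≤ y := by omega
        have h2 : (y - yA).toNat = (y - (yA + 1)).toNat + 1 := by omega
        simp [hle, h1, h2]
      · have h1 : ¬ (yA + 1 ≤ y) := by omega
        simp [hle, h1]

-- ===== VERDICT (by name: the statement is the Claim_ definition above) =====
theorem checkWall_spec : Claim_equal_checkWall := by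
  intro x y loc _
  show checkWall x y loc = checkWall_alt x y loc
  rw [checkWall, rows_eq]
  unfold checkWall_alt
  by_cases hy : 0 ≤ y ∧ y < (loc.length : Int)
  · have hylt : y.toNat < loc.length := by omega
    have h0 : (y - 0).toNat = y.toNat := by omega
    rw [if_pos hy, if_pos hy.1, h0, List.getElem?_eq_getElem hylt,
        List.getD_eq_getElem loc "" hylt]
    simp only [Option.bind_some]
    set row := loc[y.toNat]'hylt with hrow
    by_cases hx : 0 ≤ x ∧ x < (row.toList.length : Int)
    · have hxlt : x.toNat < row.toList.length := by omega
      rw [if_pos hx]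
      rw [rowRes, if_pos hx.1, List.getElem?_eq_getElem hxlt,
          List.getD_eq_getElem row.toList ' ' hxlt]
      have hw : "@~K[]DRbS".toList = pvWalls := by decide
      rw [hw]
      by_cases h : row.toList[x.toNat]'hxlt ∈ pvWalls <;> simp [h]
    · rw [if_neg hx, rowRes]
      by_cases hx0 : 0 ≤ x
      · have hge : row.toList.length ≤ x.toNat := by omega
        rw [if_pos hx0, List.getElem?_eq_none hge]
        simp
      · rw [if_neg hx0]
  · rw [if_neg hy]
    by_cases hy0 : 0 ≤ y
    · have hge : loc.length ≤ (y - 0).toNat := by omega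
      rw [if_pos hy0, List.getElem?_eq_none hge]
      simp
    · rw [if_neg hy0]
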